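-- pv_equiv track=rewrite | github.com/mejoe/smb-beauty-prospector | backend/app/tasks/discovery.py | _merge_and_dedup
-- ===== SOURCE A (Python) =====
-- def _merge_and_dedup(google_results: list, yelp_results: list) -> list[dict]:
--     """Merge results; deduplicate by name_normalized + city."""
--     seen: dict[str, dict] = {}
--     for r in google_results + yelp_results:
--         key = f"{r['name_normalized']}_{(r.get('city') or '').lower()}"
--         if key not in seen:
--             seen[key] = r
--         else:
--             # Merge: fill missing fields from the second source
--             existing = seen[key]
--             for k, v in r.items():
--                 if v and not existing.get(k):
--                     existing[k] = v
--     return list(seen.values())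
-- ===== SOURCE B (Python) =====
-- def _merge_and_dedup(google_results: list, yelp_results: list) -> list[dict]:
--     """Merge results; deduplicate by name_normalized + city.
--
--     Two-pass decomposition: first group all records by key, then merge
--     each group's records into its first-seen record."""
--     groups: dict[str, list] = {}
--     for r in google_results + yelp_results:
--         key = f"{r['name_normalized']}_{(r.get('city') or '').lower()}"
--         groups.setdefault(key, []).append(r)
--     merged = []
--     for recs in groups.values():
--         base = recs[0]
--         for r in recs[1:]:
--             for k, v in r.items():
--                 if v and not base.get(k):
--                     base[k] = v
--         merged.append(base)
--     return merged
-- ===== Notes on version B (the rewrite author's own statement) =====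
-- stated objective: alternative
-- what changed: Replaces A's single interleaved dedup-and-merge loop (dict key -> merged record, merging on each collision) by a two-pass grouping algorithm: pass 1 builds dict key -> list of all records with that key, pass 2 folds each group into its first record.
-- outside the precondition, e.g. on _merge_and_dedup([{'city': 'x'}], []): A raises KeyError, B raises KeyError
import Mathlib
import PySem

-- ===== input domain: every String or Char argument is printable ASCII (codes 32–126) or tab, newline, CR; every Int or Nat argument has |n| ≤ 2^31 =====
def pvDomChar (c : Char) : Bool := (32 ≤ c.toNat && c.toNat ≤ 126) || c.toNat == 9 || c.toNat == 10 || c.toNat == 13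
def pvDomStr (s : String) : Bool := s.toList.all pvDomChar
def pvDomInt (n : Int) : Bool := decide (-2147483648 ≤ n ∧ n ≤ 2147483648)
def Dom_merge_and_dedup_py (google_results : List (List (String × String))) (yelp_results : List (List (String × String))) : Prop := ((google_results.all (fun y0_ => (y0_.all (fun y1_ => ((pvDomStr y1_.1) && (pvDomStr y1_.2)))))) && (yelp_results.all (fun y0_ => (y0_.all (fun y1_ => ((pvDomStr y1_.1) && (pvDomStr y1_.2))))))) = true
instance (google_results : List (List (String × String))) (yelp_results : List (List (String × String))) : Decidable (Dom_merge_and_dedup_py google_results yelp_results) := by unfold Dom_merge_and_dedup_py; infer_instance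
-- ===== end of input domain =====

-- B replaces A's interleaved dedup-and-merge loop by a grouping pass (key -> list of records) followed by a
-- per-group merge pass; equivalence is about the return value (both Pythons mutate first-seen record dicts alike).


-- ===== PORT A =====
-- key = f"{r['name_normalized']}_{(r.get('city') or '').lower()}"  (Pre_ guarantees 'name_normalized' is present)
def pvKey (r : PySem.Dict String String) : String :=
  r.getD "name_normalized" "" ++ "_" ++ PySem.Str.lower (r.getD "city" "")

-- the inner merge loop both Pythons share: for k, v in r.items(): if v and not base.get(k): base[k] = v
def pvFill (base : PySem.Dict String String) (r : PySem.Dict String String) : PySem.Dict String String :=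
  r.items.foldl (fun e kv => if kv.2 ≠ "" ∧ e.getD kv.1 "" = "" then e.insert kv.1 kv.2 else e) base

def merge_and_dedup_py (google_results : List (List (String × String))) (yelp_results : List (List (String × String))) : List (List (String × String)) :=
  let seen : PySem.Dict String (PySem.Dict String String) :=
    (google_results ++ yelp_results).foldl (fun seen rl =>
      let r := PySem.Dict.ofList rl
      match seen.get? (pvKey r) with
      | none => seen.insert (pvKey r) r
      | some existing => seen.insert (pvKey r) (pvFill existing r)) PySem.Dict.empty
  seen.values.map (fun d => d.items)

-- ===== PORT B =====
-- pass 2's per-group fold: base = recs[0]; fill base from recs[1:]  ([] never occurs: groups' lists are nonempty)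
def pvMergeGroup (recs : List (PySem.Dict String String)) : PySem.Dict String String :=
  match recs with
  | [] => PySem.Dict.empty
  | base :: rest => rest.foldl pvFill base

def merge_and_dedup_py_alt (google_results : List (List (String × String))) (yelp_results : List (List (String × String))) : List (List (String × String)) :=
  let groups : PySem.Dict String (List (PySem.Dict String String)) :=
    (google_results ++ yelp_results).foldl (fun d rl =>
      let r := PySem.Dict.ofList rl
      d.modify (pvKey r) [] (fun l => l ++ [r])) PySem.Dict.empty
  (groups.values.map pvMergeGroup).map (fun d => d.items)

-- ===== PRECONDITION & SPEC =====
-- A raises KeyError on any record lacking the key 'name_normalized'; Pre_ excludes exactly those inputs.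
def Pre_merge_and_dedup_py (google_results : List (List (String × String))) (yelp_results : List (List (String × String))) : Prop :=
  ((google_results ++ yelp_results).all (fun rl => rl.any (fun kv => kv.1 == "name_normalized"))) = true
instance (google_results : List (List (String × String))) (yelp_results : List (List (String × String))) : Decidable (Pre_merge_and_dedup_py google_results yelp_results) := by unfold Pre_merge_and_dedup_py; infer_instance

def pvWitness_merge_and_dedup_py : (List (List (String × String))) × (List (List (String × String))) :=
  ([[("name_normalized", "joes pizza"), ("city", "Springfield"), ("phone", "")]],
   [[("name_normalized", "joes pizza"), ("city", "springfield"), ("phone", "555")]])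

def Spec_merge_and_dedup_py (google_results : List (List (String × String))) (yelp_results : List (List (String × String))) (out : List (List (String × String))) : Prop := out = merge_and_dedup_py_alt google_results yelp_results
instance (google_results : List (List (String × String))) (yelp_results : List (List (String × String))) (out : List (List (String × String))) : Decidable (Spec_merge_and_dedup_py google_results yelp_results out) := by unfold Spec_merge_and_dedup_py; infer_instance

-- ===== CLAIM (what is proved, stated in full; the proofs are below) =====
def Claim_equal_merge_and_dedup_py : Prop := ∀ (google_results : List (List (String × String))) (yelp_results : List (List (String × String))), Dom_merge_and_dedup_py google_results yelp_results → Pre_merge_and_dedup_py google_results yelp_results → Spec_merge_and_dedup_py google_results yelp_results (merge_and_dedup_py google_results yelp_results)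

-- ===== LEMMAS AND PROOFS =====

-- A's loop step and B's loop step, named for the invariant proof
def pvStepA (seen : PySem.Dict String (PySem.Dict String String)) (r : PySem.Dict String String) : PySem.Dict String (PySem.Dict String String) :=
  match seen.get? (pvKey r) with
  | none => seen.insert (pvKey r) r
  | some existing => seen.insert (pvKey r) (pvFill existing r)

def pvStepB (d : PySem.Dict String (List (PySem.Dict String String))) (r : PySem.Dict String String) : PySem.Dict String (List (PySem.Dict String String)) :=
  d.modify (pvKey r) [] (fun l => l ++ [r])

theorem pvMergeGroup_append (l : List (PySem.Dict String String)) (r : PySem.Dict String String) (hl : l ≠ []) :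
    pvMergeGroup (l ++ [r]) = pvFill (pvMergeGroup l) r := by
  cases l with
  | nil => exact absurd rfl hl
  | cons b t => simp [pvMergeGroup, List.foldl_append]

-- one step of both loops preserves the relation "seen's items are groups' items with each group folded up"
theorem pv_step (r : PySem.Dict String String)
    (s : PySem.Dict String (PySem.Dict String String))
    (g : PySem.Dict String (List (PySem.Dict String String)))
    (hrel : s.items = g.items.map (fun p => (p.1, pvMergeGroup p.2)))
    (hne : ∀ p ∈ g.items, p.2 ≠ []) :
    (pvStepA s r).items = (pvStepB g r).items.map (fun p => (p.1, pvMergeGroup p.2)) ∧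
      ∀ p ∈ (pvStepB g r).items, p.2 ≠ [] := by
  have hany : s.items.any (fun p => p.1 == pvKey r) = g.items.any (fun p => p.1 == pvKey r) := by
    rw [hrel]; simp [List.any_map, Function.comp_def]
  cases hfd : g.items.find? (fun p => p.1 == pvKey r) with
  | none =>
    have hcg : g.contains (pvKey r) = false := by
      simp only [PySem.Dict.contains, List.any_eq_false]
      intro p hp
      simpa using List.find?_eq_none.mp hfd p hp
    have hcs : s.contains (pvKey r) = false := by
      simp only [PySem.Dict.contains, hany]
      exact hcg
    have hgs : s.get? (pvKey r) = none := by
      simp [PySem.Dict.get?, hrel, List.find?_map, Function.comp_def, hfd]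
    have hgg : g.getD (pvKey r) [] = [] := by
      rw [PySem.Dict.getD_eq_get?_getD]; simp [PySem.Dict.get?, hfd]
    constructor
    · simp [pvStepA, hgs, pvStepB, PySem.Dict.modify, PySem.Dict.insert, hcs, hcg, hgg, hrel, pvMergeGroup]
    · intro p hp
      simp only [pvStepB, PySem.Dict.modify, PySem.Dict.insert, hcg, if_neg, Bool.false_eq_true,
        not_false_iff, hgg, List.nil_append] at hp
      rcases List.mem_append.mp hp with h | h
      · exact hne p h
      · simp at h; subst h; simp
  | some pl =>
    have hpl_mem : pl ∈ g.items := List.mem_of_find?_eq_some hfd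
    have hple : pl.2 ≠ [] := hne pl hpl_mem
    have hcg : g.contains (pvKey r) = true := by
      simp only [PySem.Dict.contains, List.any_eq_true]
      have hplk : (pl.1 == pvKey r) = true := List.find?_some (p := fun p : String × List (PySem.Dict String String) => p.1 == pvKey r) hfd
      exact ⟨pl, hpl_mem, hplk⟩
    have hcs : s.contains (pvKey r) = true := by
      simp only [PySem.Dict.contains, hany]
      exact hcg
    have hgg : g.get? (pvKey r) = some pl.2 := by
      simp [PySem.Dict.get?, hfd]
    have hgd : g.getD (pvKey r) [] = pl.2 := by
      rw [PySem.Dict.getD_eq_get?_getD, hgg]; rfl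
    have hgs : s.get? (pvKey r) = some (pvMergeGroup pl.2) := by
      simp [PySem.Dict.get?, hrel, List.find?_map, Function.comp_def, hfd]
    constructor
    · simp only [pvStepA, hgs, pvStepB, PySem.Dict.modify, PySem.Dict.insert, hcs, hcg, if_pos, hgd]
      rw [hrel, List.map_map, List.map_map]
      apply List.map_congr_left
      intro p _
      by_cases hpk : p.1 = pvKey r
      · simp [hpk, pvMergeGroup_append pl.2 r hple]
      · simp [hpk]
    · intro p hp
      simp only [pvStepB, PySem.Dict.modify, PySem.Dict.insert, hcg, if_pos, hgd, List.mem_map] at hp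
      obtain ⟨q, hq, hpq⟩ := hp
      by_cases hqk : (q.1 == pvKey r) = true
      · rw [if_pos hqk] at hpq; subst hpq; simp
      · rw [if_neg hqk] at hpq; subst hpq; exact hne q hq

-- the loop invariant, by induction on the record stream
theorem pv_inv (rs : List (PySem.Dict String String))
    (s : PySem.Dict String (PySem.Dict String String))
    (g : PySem.Dict String (List (PySem.Dict String String)))
    (hrel : s.items = g.items.map (fun p => (p.1, pvMergeGroup p.2)))
    (hne : ∀ p ∈ g.items, p.2 ≠ []) :
    (rs.foldl pvStepA s).items = (rs.foldl pvStepB g).items.map (fun p => (p.1, pvMergeGroup p.2)) ∧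
      ∀ p ∈ (rs.foldl pvStepB g).items, p.2 ≠ [] := by
  induction rs generalizing s g with
  | nil => exact ⟨hrel, hne⟩
  | cons r rs ih =>
    obtain ⟨h1, h2⟩ := pv_step r s g hrel hne
    exact ih (pvStepA s r) (pvStepB g r) h1 h2

-- ===== VERDICT (by name: the statement is the Claim_ definition above) =====
theorem merge_and_dedup_py_spec : Claim_equal_merge_and_dedup_py := by
  intro g y _ _
  show merge_and_dedup_py g y = merge_and_dedup_py_alt g y
  show (List.foldl (fun s rl => pvStepA s (PySem.Dict.ofList rl)) PySem.Dict.empty (g ++ y)).values.map (fun d => d.items)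
     = ((List.foldl (fun d rl => pvStepB d (PySem.Dict.ofList rl)) PySem.Dict.empty (g ++ y)).values.map pvMergeGroup).map (fun d => d.items)
  rw [← List.foldl_map (f := PySem.Dict.ofList) (g := pvStepA), ← List.foldl_map (f := PySem.Dict.ofList) (g := pvStepB)]
  obtain ⟨h1, _⟩ := pv_inv ((g ++ y).map PySem.Dict.ofList) PySem.Dict.empty PySem.Dict.empty rfl (by simp [PySem.Dict.empty])
  simp only [PySem.Dict.values, h1, List.map_map]
  rfl
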